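-- pv_equiv track=rewrite | github.com/baheraser123456/flask_task | convert_to_arabic.py | convert_three_digits
-- ===== SOURCE A (Python) =====
-- ones = ['صفر', 'واحد', 'اثنان', 'ثلاثة', 'أربعة', 'خمسة', 'ستة', 'سبعة', 'ثمانية', 'تسعة']
--
-- tens = ['', 'عشرة', 'عشرون', 'ثلاثون', 'أربعون', 'خمسون', 'ستون', 'سبعون', 'ثمانون', 'تسعون']
--
-- teens = ['عشرة', 'أحد عشر', 'اثنا عشر', 'ثلاثة عشر', 'أربعة عشر', 'خمسة عشر', 'ستة عشر', 'سبعة عشر', 'ثمانية عشر', 'تسعة عشر']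
--
-- hundreds = ['', 'مائة', 'مائتان', 'ثلاثمائة', 'أربعمائة', 'خمسمائة', 'ستمائة', 'سبعمائة', 'ثمانمائة', 'تسعمائة']
--
-- def convert_three_digits(number):
--     num = int(number)
--     if num < 10:
--         return ones[num]
--     elif num < 20:
--         return teens[num - 10]
--     elif num < 100:
--         return (ones[num % 10] + ' و' + tens[num // 10]) if num % 10 != 0 else tens[num // 10]
--     else:
--         remainder = num % 100
--         hundreds_part = hundreds[num // 100]
--         if remainder == 0:
--             return hundreds_part
--         else:
--             return hundreds_part + ' و' + convert_three_digits(remainder)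
-- ===== SOURCE B (Python) =====
-- ones = ['صفر', 'واحد', 'اثنان', 'ثلاثة', 'أربعة', 'خمسة', 'ستة', 'سبعة', 'ثمانية', 'تسعة']
--
-- tens = ['', 'عشرة', 'عشرون', 'ثلاثون', 'أربعون', 'خمسون', 'ستون', 'سبعون', 'ثمانون', 'تسعون']
--
-- teens = ['عشرة', 'أحد عشر', 'اثنا عشر', 'ثلاثة عشر', 'أربعة عشر', 'خمسة عشر', 'ستة عشر', 'سبعة عشر', 'ثمانية عشر', 'تسعة عشر']
--
-- hundreds = ['', 'مائة', 'مائتان', 'ثلاثمائة', 'أربعمائة', 'خمسمائة', 'ستمائة', 'سبعمائة', 'ثمانمائة', 'تسعمائة']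
--
--
-- def _build_two_digit_table():
--     # words for 0..99, built once
--     table = ones + teens
--     for t in range(2, 10):
--         table.append(tens[t])
--         for o in range(1, 10):
--             table.append(ones[o] + ' و' + tens[t])
--     return table
--
--
-- _TWO = _build_two_digit_table()
--
--
-- def convert_three_digits(number):
--     num = int(number)
--     if num < 10:
--         return ones[num]
--     h, r = divmod(num, 100)
--     if h == 0:
--         return _TWO[r]
--     if r == 0:
--         return hundreds[h]
--     return hundreds[h] + ' و' + _TWO[r]
-- ===== Notes on version B (the rewrite author's own statement) =====
-- stated objective: alternative
-- what changed: Replaces A's recursive branch chain (recomputing tens/ones composition on every call) by a 100-entry two-digit word table precomputed once by nested loops, so conversion becomes a flat divmod plus table lookups.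
import Mathlib
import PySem

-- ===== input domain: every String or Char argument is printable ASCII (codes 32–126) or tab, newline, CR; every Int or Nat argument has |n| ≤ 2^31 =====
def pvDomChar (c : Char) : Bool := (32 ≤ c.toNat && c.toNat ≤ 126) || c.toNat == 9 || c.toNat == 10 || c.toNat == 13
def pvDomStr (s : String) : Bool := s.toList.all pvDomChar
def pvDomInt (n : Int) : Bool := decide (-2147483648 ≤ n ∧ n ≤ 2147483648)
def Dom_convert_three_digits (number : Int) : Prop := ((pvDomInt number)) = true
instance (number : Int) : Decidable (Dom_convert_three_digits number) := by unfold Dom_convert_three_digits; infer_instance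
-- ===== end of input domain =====

-- B replaces A's recursive branch chain by a 100-entry two-digit word table precomputed once
-- by nested loops, so the conversion is a flat divmod plus table lookups; objective: alternative.

-- ===== PORT A =====
def pvOnes : List String := ["صفر", "واحد", "اثنان", "ثلاثة", "أربعة", "خمسة", "ستة", "سبعة", "ثمانية", "تسعة"]
def pvTens : List String := ["", "عشرة", "عشرون", "ثلاثون", "أربعون", "خمسون", "ستون", "سبعون", "ثمانون", "تسعون"]
def pvTeens : List String := ["عشرة", "أحد عشر", "اثنا عشر", "ثلاثة عشر", "أربعة عشر", "خمسة عشر", "ستة عشر", "سبعة عشر", "ثمانية عشر", "تسعة عشر"]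
def pvHundreds : List String := ["", "مائة", "مائتان", "ثلاثمائة", "أربعمائة", "خمسمائة", "ستمائة", "سبعمائة", "ثمانمائة", "تسعمائة"]

-- literal transliteration of A; the recursion is totalized with a fuel parameter
-- (fuel 2 suffices: the one recursive call receives num % 100 < 100, which never recurses again);
-- list indexing is Python-exact via pyGet? (none = IndexError, excluded by Pre_, defaulted to "")
def convertAuxA : Nat → Int → String
  | 0, _ => ""  -- fuel exhaustion guard, unreachable on the recursion A performs
  | fuel + 1, num =>
    if num < 10 then (PySem.List.pyGet? pvOnes num).getD ""
    else if num < 20 then (PySem.List.pyGet? pvTeens (num - 10)).getD ""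
    else if num < 100 then
      (if PySem.Int.mod num 10 ≠ 0 then
        ((PySem.List.pyGet? pvOnes (PySem.Int.mod num 10)).getD "") ++ " و" ++
          ((PySem.List.pyGet? pvTens (PySem.Int.floordiv num 10)).getD "")
      else (PySem.List.pyGet? pvTens (PySem.Int.floordiv num 10)).getD "")
    else
      let remainder := PySem.Int.mod num 100
      let hundreds_part := (PySem.List.pyGet? pvHundreds (PySem.Int.floordiv num 100)).getD ""
      if remainder = 0 then hundreds_part
      else hundreds_part ++ " و" ++ convertAuxA fuel remainder

def convert_three_digits (number : Int) : String := convertAuxA 2 number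

-- ===== PORT B =====
-- _build_two_digit_table of Source B: the module-level table of words for 0..99, built by nested loops
def pvTwoTable : List String :=
  (PySem.List.pyRange 2 10 1).foldl (fun table t =>
      (PySem.List.pyRange 1 10 1).foldl (fun table o =>
          table ++ [((PySem.List.pyGet? pvOnes o).getD "") ++ " و" ++ ((PySem.List.pyGet? pvTens t).getD "")])
        (table ++ [(PySem.List.pyGet? pvTens t).getD ""]))
    (pvOnes ++ pvTeens)

def convert_three_digits_alt (number : Int) : String :=
  if number < 10 then (PySem.List.pyGet? pvOnes number).getD ""
  else
    let hr := (PySem.Int.divmod? number 100).getD (0, 0)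
    if hr.1 = 0 then (PySem.List.pyGet? pvTwoTable hr.2).getD ""
    else if hr.2 = 0 then (PySem.List.pyGet? pvHundreds hr.1).getD ""
    else ((PySem.List.pyGet? pvHundreds hr.1).getD "") ++ " و" ++ ((PySem.List.pyGet? pvTwoTable hr.2).getD "")

-- ===== PRECONDITION & SPEC =====
-- Pre_ admits exactly the inputs on which A returns a value: on inputs outside this interval
-- A raises IndexError (the ones lookup below it, the hundreds lookup above it).
def Pre_convert_three_digits (number : Int) : Prop := -10 ≤ number ∧ number < 1000
instance (number : Int) : Decidable (Pre_convert_three_digits number) := by unfold Pre_convert_three_digits; infer_instance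
def pvWitness_convert_three_digits : Int := 105

def Spec_convert_three_digits (number : Int) (out : String) : Prop := out = convert_three_digits_alt number
instance (number : Int) (out : String) : Decidable (Spec_convert_three_digits number out) := by unfold Spec_convert_three_digits; infer_instance

-- ===== CLAIM (what is proved, stated in full; the proofs are below) =====
def Claim_equal_convert_three_digits : Prop := ∀ (number : Int), Dom_convert_three_digits number → Pre_convert_three_digits number → Spec_convert_three_digits number (convert_three_digits number)

-- ===== LEMMAS AND PROOFS =====

-- the fuel parameter is irrelevant below 100: no recursion happens there
theorem pv_auxA_fuel (f : Nat) (n : Int) (h : n < 100) : convertAuxA (f + 1) n = convertAuxA 1 n := by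
  simp only [convertAuxA]
  split_ifs with h1 h2 h3 <;> rfl

-- below 100, A's three leading branches agree with B's precomputed table entry
set_option maxHeartbeats 4000000 in
set_option maxRecDepth 8000 in
theorem pv_two_key : ∀ m : Nat, m < 100 →
    convertAuxA 1 (m : Int) = (PySem.List.pyGet? pvTwoTable (m : Int)).getD "" := by
  decide

theorem pv_aux_eq_table (r : Int) (h0 : 0 ≤ r) (h1 : r < 100) :
    convertAuxA 1 r = (PySem.List.pyGet? pvTwoTable r).getD "" := by
  have := pv_two_key r.toNat (by omega)
  rwa [Int.toNat_of_nonneg h0] at this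

-- one-step unfolding of A's top call (definitional)
theorem pv_auxA_step (n : Int) : convertAuxA 2 n =
    (if n < 10 then (PySem.List.pyGet? pvOnes n).getD ""
    else if n < 20 then (PySem.List.pyGet? pvTeens (n - 10)).getD ""
    else if n < 100 then
      (if PySem.Int.mod n 10 ≠ 0 then
        ((PySem.List.pyGet? pvOnes (PySem.Int.mod n 10)).getD "") ++ " و" ++
          ((PySem.List.pyGet? pvTens (PySem.Int.floordiv n 10)).getD "")
      else (PySem.List.pyGet? pvTens (PySem.Int.floordiv n 10)).getD "")
    else
      let remainder := PySem.Int.mod n 100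
      let hundreds_part := (PySem.List.pyGet? pvHundreds (PySem.Int.floordiv n 100)).getD ""
      if remainder = 0 then hundreds_part
      else hundreds_part ++ " و" ++ convertAuxA 1 remainder) := rfl

-- ===== VERDICT (by name: the statement is the Claim_ definition above) =====
theorem convert_three_digits_spec : Claim_equal_convert_three_digits := by
  intro n _ hpre
  obtain ⟨hlo, hhi⟩ := hpre
  unfold Spec_convert_three_digits convert_three_digits convert_three_digits_alt
  have h100 : (PySem.Int.divmod? n 100).getD (0, 0) = (PySem.Int.floordiv n 100, PySem.Int.mod n 100) := rfl
  by_cases h10 : n < 10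
  · -- both programs evaluate the very same ones[num] expression
    rw [pv_auxA_step, if_pos h10, if_pos h10]
  · rw [if_neg h10, h100]
    dsimp only
    have h0 : (0 : Int) ≤ n := by omega
    by_cases hlt : n < 100
    · have hfd : PySem.Int.floordiv n 100 = 0 := by
        rw [PySem.Int.floordiv_eq_iff_of_pos (by omega)]; omega
      have hmd : PySem.Int.mod n 100 = n := by
        have := PySem.Int.floordiv_mul_add_mod n 100
        omega
      rw [pv_auxA_fuel 1 n hlt, pv_aux_eq_table n h0 hlt, hfd, hmd, if_pos rfl]
    · have hfd : 1 ≤ PySem.Int.floordiv n 100 := by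
        rw [PySem.Int.le_floordiv_iff_mul_le (by omega)]; omega
      have hfd' : PySem.Int.floordiv n 100 ≠ 0 := by omega
      have hr0 : 0 ≤ PySem.Int.mod n 100 := PySem.Int.mod_nonneg n (by omega)
      have hr1 : PySem.Int.mod n 100 < 100 := PySem.Int.mod_lt n (by omega)
      rw [pv_auxA_step, if_neg h10, if_neg (by omega : ¬ n < 20), if_neg hlt]
      dsimp only
      rw [if_neg hfd']
      by_cases hz : PySem.Int.mod n 100 = 0
      · rw [if_pos hz, if_pos hz]
      · rw [if_neg hz, if_neg hz, pv_aux_eq_table _ hr0 hr1]
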